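-- pv_equiv track=rewrite | github.com/MatteoDeSantisS/Progetto-Vertex-Agiw | My_Library/.ipynb_checkpoints/metrics-checkpoint.py | total_pages_covered
-- ===== SOURCE A (Python) =====
-- def total_pages_covered(cluster_name,ground_truth):
--         total_pages_covered={}
--         for elem in ground_truth:
--             for e in cluster_name:
--                 if (elem==e[1]):
--                     if(elem in total_pages_covered.keys()):
--                         total_pages_covered[elem]=total_pages_covered[elem]+e[2]
--                     else:
--                         total_pages_covered[elem]=0
--                         total_pages_covered[elem]=total_pages_covered[elem]+e[2]
--         return total_pages_covered
-- ===== SOURCE B (Python) =====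
-- def total_pages_covered(cluster_name, ground_truth):
--     sums = {}
--     for e in cluster_name:
--         sums[e[1]] = sums.get(e[1], 0) + e[2]
--     out = {}
--     for elem in ground_truth:
--         if elem in sums:
--             out[elem] = out.get(elem, 0) + sums[elem]
--     return out
-- ===== Notes on version B (the rewrite author's own statement) =====
-- stated objective: faster
-- what changed: Precompute one dict summing each cluster's weights per page id, then a single pass over ground_truth accumulates that sum per occurrence, removing the inner scan of cluster_name.
import Mathlib
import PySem

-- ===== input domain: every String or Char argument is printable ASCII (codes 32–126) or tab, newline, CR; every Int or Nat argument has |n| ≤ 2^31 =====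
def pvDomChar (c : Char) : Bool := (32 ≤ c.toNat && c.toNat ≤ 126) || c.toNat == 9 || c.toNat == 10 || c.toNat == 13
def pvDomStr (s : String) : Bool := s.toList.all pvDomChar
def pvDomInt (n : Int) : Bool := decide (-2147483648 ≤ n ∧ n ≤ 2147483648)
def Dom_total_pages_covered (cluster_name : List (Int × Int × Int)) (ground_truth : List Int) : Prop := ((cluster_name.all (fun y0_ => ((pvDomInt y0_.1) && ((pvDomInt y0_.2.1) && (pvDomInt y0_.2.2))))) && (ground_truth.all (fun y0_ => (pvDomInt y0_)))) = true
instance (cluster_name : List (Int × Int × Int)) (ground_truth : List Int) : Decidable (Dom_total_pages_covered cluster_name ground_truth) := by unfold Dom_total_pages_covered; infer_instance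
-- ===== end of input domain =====

-- B replaces A's nested scan (each ground-truth page rescans cluster_name) by one precomputed
-- page->summed-weight dict and a single accumulating pass over ground_truth (faster: asymptotic).
-- ===== PORT A =====
def total_pages_covered (cluster_name : List (Int × Int × Int)) (ground_truth : List Int) : List (Int × Int) :=
  (ground_truth.foldl (fun d elem =>
    cluster_name.foldl (fun d e =>
      if elem == e.2.1 then
        if d.contains elem then
          d.insert elem (d.getD elem 0 + e.2.2)
        else
          ((d.insert elem 0).insert elem ((d.insert elem 0).getD elem 0 + e.2.2))
      else d) d) (PySem.Dict.empty : PySem.Dict Int Int)).items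

-- ===== PORT B =====
def total_pages_covered_alt (cluster_name : List (Int × Int × Int)) (ground_truth : List Int) : List (Int × Int) :=
  let sums := cluster_name.foldl (fun d e => d.insert e.2.1 (d.getD e.2.1 0 + e.2.2))
                (PySem.Dict.empty : PySem.Dict Int Int)
  (ground_truth.foldl (fun d elem =>
      if sums.contains elem then d.insert elem (d.getD elem 0 + sums.getD elem 0) else d)
    (PySem.Dict.empty : PySem.Dict Int Int)).items

-- ===== PRECONDITION & SPEC =====
def Spec_total_pages_covered (cluster_name : List (Int × Int × Int)) (ground_truth : List Int) (out : List (Int × Int)) : Prop := out = total_pages_covered_alt cluster_name ground_truth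
instance (cluster_name : List (Int × Int × Int)) (ground_truth : List Int) (out : List (Int × Int)) : Decidable (Spec_total_pages_covered cluster_name ground_truth out) := by unfold Spec_total_pages_covered; infer_instance

-- ===== CLAIM (what is proved, stated in full; the proofs are below) =====
def Claim_equal_total_pages_covered : Prop := ∀ (cluster_name : List (Int × Int × Int)) (ground_truth : List Int), Dom_total_pages_covered cluster_name ground_truth → Spec_total_pages_covered cluster_name ground_truth (total_pages_covered cluster_name ground_truth)

-- ===== LEMMAS AND PROOFS =====

-- contains of the precomputed sums dict, over any start dict
theorem pv_sums_contains (cn : List (Int × Int × Int)) (d : PySem.Dict Int Int) (x : Int) :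
    (cn.foldl (fun d e => d.insert e.2.1 (d.getD e.2.1 0 + e.2.2)) d).contains x
      = (d.contains x || cn.any (fun e => e.2.1 == x)) := by
  induction cn generalizing d with
  | nil => simp
  | cons e rest ih =>
      simp only [List.foldl_cons, List.any_cons, ih, PySem.Dict.contains_insert]
      by_cases hx : e.2.1 = x
      · subst hx; simp
      · have h1 : (x == e.2.1) = false := beq_eq_false_iff_ne.mpr (Ne.symm hx)
        have h2 : (e.2.1 == x) = false := beq_eq_false_iff_ne.mpr hx
        simp [h1, h2]

-- getD of the precomputed sums dict = start value + summed weights of matching clusters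
theorem pv_sums_getD (cn : List (Int × Int × Int)) (d : PySem.Dict Int Int) (x : Int) :
    (cn.foldl (fun d e => d.insert e.2.1 (d.getD e.2.1 0 + e.2.2)) d).getD x 0
      = d.getD x 0 + ((cn.filter (fun e => e.2.1 == x)).map (·.2.2)).sum := by
  induction cn generalizing d with
  | nil => simp
  | cons e rest ih =>
      simp only [List.foldl_cons, List.filter_cons, ih, PySem.Dict.getD_insert]
      by_cases h : e.2.1 = x
      · simp [h]
        ring
      · have hb : (e.2.1 == x) = false := beq_eq_false_iff_ne.mpr h
        simp [hb, if_neg (Ne.symm h)]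

-- A's inner loop over cluster_name, characterised
theorem pv_inner_A (cn : List (Int × Int × Int)) (d : PySem.Dict Int Int) (elem : Int) :
    cn.foldl (fun d e =>
      if elem == e.2.1 then
        if d.contains elem then
          d.insert elem (d.getD elem 0 + e.2.2)
        else
          ((d.insert elem 0).insert elem ((d.insert elem 0).getD elem 0 + e.2.2))
      else d) d
    = (if cn.any (fun e => e.2.1 == elem) then
        d.insert elem (d.getD elem 0 + ((cn.filter (fun e => e.2.1 == elem)).map (·.2.2)).sum)
       else d) := by
  induction cn generalizing d with
  | nil => simp
  | cons e rest ih =>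
      simp only [List.foldl_cons, List.any_cons, List.filter_cons]
      by_cases h : elem = e.2.1
      · have hb : (e.2.1 == elem) = true := beq_iff_eq.mpr h.symm
        have hstep : (if elem == e.2.1 then
              if d.contains elem then
                d.insert elem (d.getD elem 0 + e.2.2)
              else
                ((d.insert elem 0).insert elem ((d.insert elem 0).getD elem 0 + e.2.2))
            else d)
            = d.insert elem (d.getD elem 0 + e.2.2) := by
          rw [if_pos (beq_iff_eq.mpr h)]
          by_cases hc : d.contains elem = true
          · rw [if_pos hc]
          · have h0 : d.getD elem 0 = 0 :=
              PySem.Dict.getD_of_not_contains d 0 (by simpa using hc)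
            rw [if_neg hc, PySem.Dict.insert_insert_self, PySem.Dict.getD_insert_self, h0]
        rw [hstep, ih]
        by_cases hr : rest.any (fun e => e.2.1 == elem) = true
        · rw [if_pos hr, if_pos (by simp [hb]), PySem.Dict.getD_insert_self,
              PySem.Dict.insert_insert_self]
          simp [hb, add_assoc]
        · rw [if_neg hr, if_pos (by simp [hb])]
          rw [List.filter_eq_nil_iff.mpr
            (fun a ha hcon => hr (List.any_eq_true.mpr ⟨a, ha, hcon⟩))]
          simp [hb]
      · have hb : (e.2.1 == elem) = false := beq_eq_false_iff_ne.mpr (Ne.symm h)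
        have hb2 : (elem == e.2.1) = false := beq_eq_false_iff_ne.mpr h
        rw [if_neg (by simp [hb2])]
        simp only [hb, Bool.false_or, Bool.false_eq_true, if_false]
        exact ih d

-- ===== VERDICT (by name: the statement is the Claim_ definition above) =====
theorem total_pages_covered_spec : Claim_equal_total_pages_covered := by
  intro cn gt _
  unfold Spec_total_pages_covered total_pages_covered total_pages_covered_alt
  congr 1
  congr 1
  funext d elem
  rw [pv_inner_A, pv_sums_contains, pv_sums_getD,
      PySem.Dict.contains_empty, PySem.Dict.getD_empty, Bool.false_or, zero_add]
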